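-- pv_equiv track=rewrite | github.com/EliasAroni2000/automatas | Aroni-tp1-v2.py | tokenDesigual
-- ===== SOURCE A (Python) =====
-- estado_final = "estado final"
--
-- estadoNoFinal = "estado no aceptado"
--
-- estadoTrampa = "estado trampa"
--
-- def tokenDesigual(lexema):
--     estado = 0
--     estadoFinal = [2]
--     caracter = {0:{'<':1},1:{'>':2},2:{}}
--     for c in lexema:
--         if c in caracter[estado]:
--             estado = caracter[estado][c]
--         else:
--             estado = -1
--             break
--     if estado == -1:
--         return estadoTrampa
--     if estado in estadoFinal:
--         return estado_final
--     else:
--         return estadoNoFinal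
-- ===== SOURCE B (Python) =====
-- estado_final = "estado final"
--
-- estadoNoFinal = "estado no aceptado"
--
-- estadoTrampa = "estado trampa"
--
-- def tokenDesigual(lexema):
--     chars = list(lexema)
--     if chars == ['<', '>']:
--         return estado_final
--     if chars in ([], ['<']):
--         return estadoNoFinal
--     return estadoTrampa
-- ===== Notes on version B (the rewrite author's own statement) =====
-- stated objective: simpler
-- what changed: Replaced the table-driven DFA simulation loop with a closed-form comparison: the DFA accepts exactly '<>', its proper prefixes '' and '<' are non-final, everything else is trap.
import Mathlib
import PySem

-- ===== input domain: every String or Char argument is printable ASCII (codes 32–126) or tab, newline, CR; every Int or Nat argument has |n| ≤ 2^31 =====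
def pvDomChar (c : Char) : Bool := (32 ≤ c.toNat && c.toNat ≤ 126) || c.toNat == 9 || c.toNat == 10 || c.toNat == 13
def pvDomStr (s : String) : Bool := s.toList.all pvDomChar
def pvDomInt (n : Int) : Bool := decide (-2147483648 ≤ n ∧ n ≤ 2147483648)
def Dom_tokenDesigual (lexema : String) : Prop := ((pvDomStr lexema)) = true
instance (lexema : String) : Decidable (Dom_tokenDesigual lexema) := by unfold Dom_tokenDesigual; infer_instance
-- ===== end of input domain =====

-- B replaces A's table-driven DFA simulation loop with a closed-form comparison (objective: simpler).

-- ===== PORT A =====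
-- the transition table caracter = {0:{'<':1},1:{'>':2},2:{}}
def pvCaracter : PySem.Dict Int (PySem.Dict Char Int) :=
  PySem.Dict.ofList [(0, PySem.Dict.ofList [('<', 1)]),
                     (1, PySem.Dict.ofList [('>', 2)]),
                     (2, PySem.Dict.ofList [])]

-- the for-loop: 'if c in caracter[estado]: estado = caracter[estado][c] else: estado = -1; break'
-- (caracter[estado] never raises KeyError in A: estado is 0, 1 or 2 whenever it is looked up,
--  since the loop breaks as soon as estado becomes -1; the default empty dict is never used)
def pvLoopA : Int → List Char → Int
  | estado, [] => estado
  | estado, c :: rest =>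
    match (PySem.Dict.getD pvCaracter estado (PySem.Dict.ofList [])).get? c with
    | some v => pvLoopA v rest
    | none => -1

def tokenDesigual (lexema : String) : String :=
  let estado := pvLoopA 0 lexema.toList
  if estado = -1 then "estado trampa"
  else if estado ∈ ([2] : List Int) then "estado final"
  else "estado no aceptado"

-- ===== PORT B =====
def tokenDesigual_alt (lexema : String) : String :=
  let chars := lexema.toList
  if chars = ['<', '>'] then "estado final"
  else if chars = [] ∨ chars = ['<'] then "estado no aceptado"
  else "estado trampa"

-- ===== PRECONDITION & SPEC =====
def Spec_tokenDesigual (lexema : String) (out : String) : Prop := out = tokenDesigual_alt lexema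
instance (lexema : String) (out : String) : Decidable (Spec_tokenDesigual lexema out) := by unfold Spec_tokenDesigual; infer_instance

-- ===== CLAIM (what is proved, stated in full; the proofs are below) =====
def Claim_equal_tokenDesigual : Prop := ∀ (lexema : String), Dom_tokenDesigual lexema → Spec_tokenDesigual lexema (tokenDesigual lexema)

-- ===== LEMMAS AND PROOFS =====

-- one loop iteration from each of the three live states
theorem pvLoopA_zero_cons (c : Char) (rest : List Char) :
    pvLoopA 0 (c :: rest) = if c = '<' then pvLoopA 1 rest else -1 := by
  unfold pvLoopA
  by_cases h : c = '<'
  · subst h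
    rw [show (pvCaracter.getD 0 (PySem.Dict.ofList [])).get? '<' = some 1 from by decide]
    cases rest <;> rfl
  · rw [show PySem.Dict.getD pvCaracter 0 (PySem.Dict.ofList []) = PySem.Dict.mk [('<', 1)] from rfl]
    simp [PySem.Dict.get?, h, Ne.symm h]

theorem pvLoopA_one_cons (c : Char) (rest : List Char) :
    pvLoopA 1 (c :: rest) = if c = '>' then pvLoopA 2 rest else -1 := by
  unfold pvLoopA
  by_cases h : c = '>'
  · subst h
    rw [show (pvCaracter.getD 1 (PySem.Dict.ofList [])).get? '>' = some 2 from by decide]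
    cases rest <;> rfl
  · rw [show PySem.Dict.getD pvCaracter 1 (PySem.Dict.ofList []) = PySem.Dict.mk [('>', 2)] from rfl]
    simp [PySem.Dict.get?, h, Ne.symm h]

theorem pvLoopA_two_cons (c : Char) (rest : List Char) : pvLoopA 2 (c :: rest) = -1 := by
  unfold pvLoopA
  rw [show PySem.Dict.getD pvCaracter 2 (PySem.Dict.ofList []) = PySem.Dict.mk [] from rfl]
  simp [PySem.Dict.get?]

-- ===== VERDICT (by name: the statement is the Claim_ definition above) =====
theorem tokenDesigual_spec : Claim_equal_tokenDesigual := by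
  intro lexema _
  unfold Spec_tokenDesigual tokenDesigual tokenDesigual_alt
  rcases h : lexema.toList with _ | ⟨c, _ | ⟨d, rest⟩⟩
  · rfl
  · by_cases hc : c = '<'
    · subst hc; rfl
    · rw [pvLoopA_zero_cons, if_neg hc]; simp [hc]
  · by_cases hc : c = '<'
    · subst hc
      by_cases hd : d = '>'
      · subst hd
        rcases rest with _ | ⟨e, rest'⟩
        · rfl
        · rw [pvLoopA_zero_cons, if_pos rfl, pvLoopA_one_cons, if_pos rfl, pvLoopA_two_cons]
          simp
      · rw [pvLoopA_zero_cons, if_pos rfl, pvLoopA_one_cons, if_neg hd]; simp [hd]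
    · rw [pvLoopA_zero_cons, if_neg hc]; simp [hc]
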